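-- pv_equiv track=rewrite | github.com/nreymundo/google-nextcloud-sync | src/g2nc/utils/hashing.py | _normalize_common
-- ===== SOURCE A (Python) =====
-- from collections.abc import Iterable, Sequence
--
-- def _unfold(text: str) -> str:
--     t = text.replace("\r\n", "\n")
--     lines = t.split("\n")
--     out: list[str] = []
--     for line in lines:
--         if out and (line.startswith(" ") or line.startswith("\t")):
--             out[-1] = out[-1] + line.lstrip(" \t")
--         else:
--             out.append(line)
--     return "\n".join(out)
--
-- def _strip_volatile(lines: Iterable[str], volatile_prefixes: Sequence[str]) -> list[str]:
--     filtered: list[str] = []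
--     for ln in lines:
--         s = ln.strip()
--         if not s:
--             continue
--         # drop volatile lines
--         if any(s.startswith(pfx) for pfx in volatile_prefixes):
--             continue
--         filtered.append(s)
--     return filtered
--
-- def _canonicalize_properties(lines: Iterable[str]) -> list[str]:
--     """Canonicalize property lines:
--     - Trim surrounding whitespace
--     - For 'NAME:VALUE' form, trim around both and compress internal whitespace in VALUE
--     """
--     out: list[str] = []
--     for raw in lines:
--         s = raw.strip()
--         if not s:
--             continue
--         if ":" in s:
--             name, val = s.split(":", 1)
--             canon_val = " ".join(val.strip().split())
--             out.append(f"{name.strip()}:{canon_val}")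
--         else:
--             out.append(" ".join(s.split()))
--     return out
--
-- def _sorted_stable(lines: Iterable[str]) -> list[str]:
--     """Sort lines lexicographically with BEGIN:* first and END:* last."""
--
--     def key_func(s: str) -> tuple[int, str]:
--         if s.startswith("BEGIN:"):
--             return (0, s)
--         if s.startswith("END:"):
--             return (2, s)
--         return (1, s)
--
--     return sorted(lines, key=key_func)
--
-- def _normalize_common(text: str, volatile_prefixes: Sequence[str]) -> str:
--     t = _unfold(text).replace("\r\n", "\n")
--     raw_lines = t.split("\n")
--     # trim trailing spaces and drop empties
--     cleaned = [ln.rstrip() for ln in raw_lines if ln.strip() != ""]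
--     # strip volatile
--     stable = _strip_volatile(cleaned, volatile_prefixes)
--     # canonicalize property formatting
--     canon = _canonicalize_properties(stable)
--     # sort with pinned edges
--     ordered = _sorted_stable(canon)
--     # final newline-free normalized string
--     return "\n".join(ordered)
-- ===== SOURCE B (Python) =====
-- def _unfold(text):
--     # unchanged continuation-line unfolding (it carries state across lines)
--     t = text.replace("\r\n", "\n")
--     lines = t.split("\n")
--     out = []
--     for line in lines:
--         if out and (line.startswith(" ") or line.startswith("\t")):
--             out[-1] = out[-1] + line.lstrip(" \t")
--         else:
--             out.append(line)
--     return "\n".join(out)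
--
-- def _normalize_common(text, volatile_prefixes):
--     # single fused pass: strip / drop-empty / drop-volatile / canonicalize in one loop,
--     # then an explicit three-way partition instead of a key-function sort
--     begins, middle, ends = [], [], []
--     for ln in _unfold(text).replace("\r\n", "\n").split("\n"):
--         s = ln.strip()
--         if not s or any(s.startswith(pfx) for pfx in volatile_prefixes):
--             continue
--         if ":" in s:
--             name, val = s.split(":", 1)
--             c = name.strip() + ":" + " ".join(val.strip().split())
--         else:
--             c = " ".join(s.split())
--         if c.startswith("BEGIN:"):
--             begins.append(c)
--         elif c.startswith("END:"):
--             ends.append(c)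
--         else:
--             middle.append(c)
--     return "\n".join(sorted(begins) + sorted(middle) + sorted(ends))
-- ===== Notes on version B (the rewrite author's own statement) =====
-- stated objective: alternative
-- what changed: B fuses A's three chained passes (clean, strip-volatile, canonicalize) into one loop over the unfolded lines and replaces the (bucket, line) key-function sort by an explicit three-way partition into BEGIN:/middle/END: buckets, each sorted separately and concatenated.
import Mathlib
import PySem

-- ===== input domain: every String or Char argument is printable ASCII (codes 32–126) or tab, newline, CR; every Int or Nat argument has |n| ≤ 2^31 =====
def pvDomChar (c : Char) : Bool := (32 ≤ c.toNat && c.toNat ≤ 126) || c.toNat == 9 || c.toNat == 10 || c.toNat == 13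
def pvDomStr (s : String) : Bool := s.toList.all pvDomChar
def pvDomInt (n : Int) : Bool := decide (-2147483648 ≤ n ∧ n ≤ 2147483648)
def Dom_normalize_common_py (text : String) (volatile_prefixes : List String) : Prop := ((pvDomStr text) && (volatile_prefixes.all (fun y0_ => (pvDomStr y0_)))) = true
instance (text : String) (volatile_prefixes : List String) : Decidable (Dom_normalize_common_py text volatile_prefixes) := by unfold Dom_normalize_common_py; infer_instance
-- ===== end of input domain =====

-- B fuses A's three chained passes into one loop and replaces the key-function sort by an
-- explicit three-way partition; same return value, no speed claim.

-- shared helpers: _unfold (identical in both sources) and the property-canonicalization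
-- expression (textually identical in A's _canonicalize_properties and in B's loop body)

-- exact port of line.lstrip(" \t"): drop leading characters belonging to {' ', '\t'}
def pvLstripSpTab (line : String) : String :=
  String.ofList (line.toList.dropWhile (fun c => [' ', '\t'].contains c))

def pvUnfold (text : String) : String :=
  let t := PySem.Str.replace text "\r\n" "\n"
  let lines := (PySem.Chars.splitOn t.toList "\n".toList).map String.ofList
  let out : List String := lines.foldl (fun out line =>
    if !out.isEmpty && (PySem.Str.startswith line " " || PySem.Str.startswith line "\t") then
      -- out[-1] = out[-1] + line.lstrip(" \t")  (string concatenation, exact on ASCII)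
      out.dropLast ++ [String.ofList (out.getLast!.toList ++ (pvLstripSpTab line).toList)]
    else out ++ [line]) []
  PySem.Str.join "\n" out

-- 'NAME:VALUE' canonicalization of one (already stripped, non-empty) line, as written
-- identically in both Python sources
def pvCanonProp (s : String) : String :=
  if PySem.Str.isIn ":" s then
    match PySem.Str.splitMax? s ":" 1 with
    | some (name :: val :: _) =>
        String.ofList ((PySem.Str.strip name).toList ++
          (':' :: (PySem.Str.join " " (PySem.Str.split₀ (PySem.Str.strip val))).toList))
    | _ => s    -- unreachable: ':' in s guarantees a two-part split
  else PySem.Str.join " " (PySem.Str.split₀ s)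

-- ===== PORT A =====
-- key_func of _sorted_stable
def pvSortKey1 (s : String) : Int :=
  if PySem.Str.startswith s "BEGIN:" then 0
  else if PySem.Str.startswith s "END:" then 2
  else 1

def normalize_common_py (text : String) (volatile_prefixes : List String) : String :=
  let t := PySem.Str.replace (pvUnfold text) "\r\n" "\n"
  let raw_lines := (PySem.Chars.splitOn t.toList "\n".toList).map String.ofList
  let cleaned := (raw_lines.filter (fun ln => !(PySem.Str.strip ln == ""))).map PySem.Str.rstrip
  -- _strip_volatile
  let stable := cleaned.foldl (fun acc ln =>
      let s := PySem.Str.strip ln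
      if s == "" then acc
      else if volatile_prefixes.any (fun pfx => PySem.Str.startswith s pfx) then acc
      else acc ++ [s]) []
  -- _canonicalize_properties
  let canon := stable.foldl (fun acc raw =>
      let s := PySem.Str.strip raw
      if s == "" then acc else acc ++ [pvCanonProp s]) []
  -- _sorted_stable: sorted(lines, key=lambda s: (bucket, s))
  let ordered := PySem.List.sorted2 canon pvSortKey1 (fun s => s) false
  PySem.Str.join "\n" ordered

-- ===== PORT B =====
def normalize_common_py_alt (text : String) (volatile_prefixes : List String) : String :=
  let lines := (PySem.Chars.splitOn
      (PySem.Str.replace (pvUnfold text) "\r\n" "\n").toList "\n".toList).map String.ofList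
  let acc := lines.foldl (fun (acc : List String × List String × List String) ln =>
      let s := PySem.Str.strip ln
      if s == "" || volatile_prefixes.any (fun pfx => PySem.Str.startswith s pfx) then acc
      else
        let c := pvCanonProp s
        if PySem.Str.startswith c "BEGIN:" then (acc.1 ++ [c], acc.2.1, acc.2.2)
        else if PySem.Str.startswith c "END:" then (acc.1, acc.2.1, acc.2.2 ++ [c])
        else (acc.1, acc.2.1 ++ [c], acc.2.2)) ([], [], [])
  PySem.Str.join "\n"
    (PySem.List.sorted acc.1 (fun s => s) false ++
     PySem.List.sorted acc.2.1 (fun s => s) false ++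
     PySem.List.sorted acc.2.2 (fun s => s) false)

-- ===== PRECONDITION & SPEC =====
def Spec_normalize_common_py (text : String) (volatile_prefixes : List String) (out : String) : Prop := out = normalize_common_py_alt text volatile_prefixes
instance (text : String) (volatile_prefixes : List String) (out : String) : Decidable (Spec_normalize_common_py text volatile_prefixes out) := by unfold Spec_normalize_common_py; infer_instance

-- ===== CLAIM (what is proved, stated in full; the proofs are below) =====
def Claim_equal_normalize_common_py : Prop := ∀ (text : String) (volatile_prefixes : List String), Dom_normalize_common_py text volatile_prefixes → Spec_normalize_common_py text volatile_prefixes (normalize_common_py text volatile_prefixes)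

-- ===== LEMMAS AND PROOFS =====

-- dropWhile is idempotent
theorem pvDropWhileIdem {α : Type} (p : α → Bool) (l : List α) :
    List.dropWhile p (List.dropWhile p l) = List.dropWhile p l := by
  induction l with
  | nil => rfl
  | cons c t ih =>
    by_cases h : p c
    · simp [h, ih]
    · simp [h]

-- left- and right-stripping commute
theorem pvDRComm {α : Type} (p : α → Bool) (l : List α) :
    List.dropWhile p ((List.dropWhile p l.reverse).reverse)
      = (List.dropWhile p (List.dropWhile p l).reverse).reverse := by
  induction l with
  | nil => rfl
  | cons c t ih =>
    rw [List.reverse_cons, List.dropWhile_append, List.dropWhile_cons]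
    by_cases hE : (List.dropWhile p t.reverse).isEmpty
    · simp only [hE, if_pos]
      by_cases hc : p c
      · simp only [hc, if_pos, List.dropWhile_cons, hc]
        simp only [List.isEmpty_iff] at hE
        rw [hE] at ih
        simpa [hc] using ih
      · simp [hc, List.dropWhile_append, hE]
    · simp only [hE, if_neg, Bool.false_eq_true, not_false_iff]
      by_cases hc : p c
      · rw [List.reverse_append, List.reverse_singleton, List.singleton_append,
          List.dropWhile_cons, if_pos hc, ih]
        simp [hc, List.dropWhile_cons]
      · rw [List.reverse_append, List.reverse_singleton, List.singleton_append,
          List.dropWhile_cons, if_neg (by simp [hc])]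
        simp [hc, List.dropWhile_cons, List.dropWhile_append, hE]

theorem pvLstripRstripComm (l : List Char) :
    PySem.Chars.lstrip (PySem.Chars.rstrip l) = PySem.Chars.rstrip (PySem.Chars.lstrip l) :=
  pvDRComm PySem.Chars.isspace l

theorem pvRstripIdem (l : List Char) :
    PySem.Chars.rstrip (PySem.Chars.rstrip l) = PySem.Chars.rstrip l := by
  simp [PySem.Chars.rstrip, pvDropWhileIdem]

theorem pvCharsStripRstrip (l : List Char) :
    PySem.Chars.strip (PySem.Chars.rstrip l) = PySem.Chars.strip l := by
  unfold PySem.Chars.strip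
  rw [pvLstripRstripComm, pvRstripIdem]

theorem pvCharsStripStrip (l : List Char) :
    PySem.Chars.strip (PySem.Chars.strip l) = PySem.Chars.strip l := by
  unfold PySem.Chars.strip
  rw [pvLstripRstripComm, pvRstripIdem]
  simp [PySem.Chars.lstrip, pvDropWhileIdem]

theorem pvStrStripRstrip (s : String) :
    PySem.Str.strip (PySem.Str.rstrip s) = PySem.Str.strip s := by
  simp [PySem.Str.strip, PySem.Str.rstrip, pvCharsStripRstrip]

theorem pvStrStripStrip (s : String) :
    PySem.Str.strip (PySem.Str.strip s) = PySem.Str.strip s := by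
  simp [PySem.Str.strip, pvCharsStripStrip]

-- sorted with a two-component key is sorted with the lexicographic key
theorem pvSorted2EqSortedLex (xs : List String) (k1 : String → Int) :
    PySem.List.sorted2 xs k1 (fun s => s) false
      = PySem.List.sorted xs (fun x => toLex (k1 x, x)) false := by
  unfold PySem.List.sorted2 PySem.List.sorted
  simp only
  congr 1
  funext acc x
  congr 1
  funext a b
  rcases lt_trichotomy (k1 a) (k1 b) with h|h|h <;>
    simp [Prod.Lex.toLex_lt_toLex, h, lt_asymm]

theorem pvSorted2Split (xs : List String) (k1 : String → Int)
    (h : ∀ x, k1 x = 0 ∨ k1 x = 1 ∨ k1 x = 2) :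
    PySem.List.sorted2 xs k1 (fun s => s) false =
      PySem.List.sorted (xs.filter (fun x => k1 x == 0)) (fun s => s) false ++
      PySem.List.sorted (xs.filter (fun x => k1 x == 1)) (fun s => s) false ++
      PySem.List.sorted (xs.filter (fun x => k1 x == 2)) (fun s => s) false := by
  rw [pvSorted2EqSortedLex]
  set key : String → Lex (Int × String) := fun x => toLex (k1 x, x) with hkey
  have hinj : Function.Injective key := by
    intro a b hab
    have := congrArg (fun y => (ofLex y).2) hab
    simpa using this
  apply PySem.List.eq_of_perm_of_pairwise_le_of_injective key hinj
  · -- Perm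
    have h1 := List.filter_append_perm (fun x => k1 x == 0) xs
    have e1 : List.filter (fun x => k1 x == 1) (List.filter (fun x => !(k1 x == 0)) xs)
        = List.filter (fun x => k1 x == 1) xs := by
      rw [List.filter_filter]
      apply List.filter_congr
      intro x _
      rcases h x with h'|h'|h' <;> simp [h']
    have e2 : List.filter (fun x => !(k1 x == 1)) (List.filter (fun x => !(k1 x == 0)) xs)
        = List.filter (fun x => k1 x == 2) xs := by
      rw [List.filter_filter]
      apply List.filter_congr
      intro x _
      rcases h x with h'|h'|h' <;> simp [h']
    have h2 := List.filter_append_perm (fun x => k1 x == 1) (List.filter (fun x => !(k1 x == 0)) xs)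
    rw [e1, e2] at h2
    refine ((PySem.List.sorted_perm xs key false).trans ?_)
    have hx : (List.filter (fun x => k1 x == 0) xs ++ (List.filter (fun x => k1 x == 1) xs ++ List.filter (fun x => k1 x == 2) xs)).Perm xs :=
      (List.Perm.append_left _ h2).trans h1
    have hs : (PySem.List.sorted (xs.filter (fun x => k1 x == 0)) (fun s => s) false ++
        PySem.List.sorted (xs.filter (fun x => k1 x == 1)) (fun s => s) false ++
        PySem.List.sorted (xs.filter (fun x => k1 x == 2)) (fun s => s) false).Perm
        (List.filter (fun x => k1 x == 0) xs ++ (List.filter (fun x => k1 x == 1) xs ++ List.filter (fun x => k1 x == 2) xs)) := by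
      rw [List.append_assoc]
      exact (PySem.List.sorted_perm _ _ _).append ((PySem.List.sorted_perm _ _ _).append (PySem.List.sorted_perm _ _ _))
    exact (hs.trans hx).symm
  · exact PySem.List.sorted_pairwise xs key
  · -- Pairwise of the concatenation
    have hmem : ∀ (i : Int), ∀ x ∈ PySem.List.sorted (xs.filter (fun x => k1 x == i)) (fun s => s) false, k1 x = i := by
      intro i x hx
      rw [PySem.List.mem_sorted] at hx
      have := List.of_mem_filter hx
      simpa using this
    have hpw : ∀ (i : Int), List.Pairwise (fun a b => key a ≤ key b)
        (PySem.List.sorted (xs.filter (fun x => k1 x == i)) (fun s => s) false) := by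
      intro i
      refine List.Pairwise.imp_of_mem ?_ (PySem.List.sorted_pairwise (xs.filter (fun x => k1 x == i)) (fun s => s))
      intro a b ha hb hab
      have hka := hmem i a ha
      have hkb := hmem i b hb
      rw [hkey]
      simp only [Prod.Lex.toLex_le_toLex]
      exact Or.inr ⟨hka.trans hkb.symm, hab⟩
    have hcross : ∀ (i j : Int), i < j →
        ∀ a ∈ PySem.List.sorted (xs.filter (fun x => k1 x == i)) (fun s => s) false,
        ∀ b ∈ PySem.List.sorted (xs.filter (fun x => k1 x == j)) (fun s => s) false,
        key a ≤ key b := by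
      intro i j hij a ha b hb
      have hka := hmem i a ha
      have hkb := hmem j b hb
      rw [hkey]
      simp only [Prod.Lex.toLex_le_toLex]
      exact Or.inl (by omega)
    rw [List.append_assoc, List.pairwise_append, List.pairwise_append]
    exact ⟨hpw 0, ⟨hpw 1, hpw 2, hcross 1 2 (by norm_num)⟩,
      fun a ha b hb => by
        rcases List.mem_append.mp hb with hb'|hb'
        · exact hcross 0 1 (by norm_num) a ha b hb'
        · exact hcross 0 2 (by norm_num) a ha b hb'⟩

theorem pvFoldStable (v : List String) (cleaned : List String) :
    cleaned.foldl (fun acc ln =>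
      if PySem.Str.strip ln == "" then acc
      else if v.any (fun pfx => PySem.Str.startswith (PySem.Str.strip ln) pfx) then acc
      else acc ++ [PySem.Str.strip ln]) [] =
    (cleaned.filter (fun ln => !(PySem.Str.strip ln == "") &&
        !(v.any (fun pfx => PySem.Str.startswith (PySem.Str.strip ln) pfx)))).map PySem.Str.strip := by
  have h : (fun (acc : List String) ln =>
      if PySem.Str.strip ln == "" then acc
      else if v.any (fun pfx => PySem.Str.startswith (PySem.Str.strip ln) pfx) then acc
      else acc ++ [PySem.Str.strip ln]) = (fun acc ln =>
      if (!(PySem.Str.strip ln == "") &&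
          !(v.any (fun pfx => PySem.Str.startswith (PySem.Str.strip ln) pfx))) then
        acc ++ [PySem.Str.strip ln] else acc) := by
    funext acc ln
    by_cases h1 : PySem.Str.strip ln == "" <;>
      by_cases h2 : v.any (fun pfx => PySem.Str.startswith (PySem.Str.strip ln) pfx) <;>
        simp [h1, h2, -List.any_eq_true, -List.any_eq_false, -PySem.Str.startswith_eq]
  rw [h, PySem.List.foldl_append_if]
  simp
-- step 2: A's _canonicalize_properties fold as filter+map

theorem pvFoldCanon (stable : List String) :
    stable.foldl (fun acc raw =>
      if PySem.Str.strip raw == "" then acc else acc ++ [pvCanonProp (PySem.Str.strip raw)]) [] =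
    (stable.filter (fun r => !(PySem.Str.strip r == ""))).map
      (fun r => pvCanonProp (PySem.Str.strip r)) := by
  have h : (fun (acc : List String) raw =>
      if PySem.Str.strip raw == "" then acc else acc ++ [pvCanonProp (PySem.Str.strip raw)]) = (fun acc raw =>
      if !(PySem.Str.strip raw == "") then acc ++ [pvCanonProp (PySem.Str.strip raw)] else acc) := by
    funext acc raw
    by_cases h1 : PySem.Str.strip raw == "" <;> simp [h1]
  rw [h, PySem.List.foldl_append_if]
  simp

-- step 3: B's fused fold as three filter+maps

theorem pvFoldB (v : List String) (lines : List String) :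
    lines.foldl (fun (acc : List String × List String × List String) ln =>
      if PySem.Str.strip ln == "" || v.any (fun pfx => PySem.Str.startswith (PySem.Str.strip ln) pfx) then acc
      else
        if PySem.Str.startswith (pvCanonProp (PySem.Str.strip ln)) "BEGIN:" then
          (acc.1 ++ [pvCanonProp (PySem.Str.strip ln)], acc.2.1, acc.2.2)
        else if PySem.Str.startswith (pvCanonProp (PySem.Str.strip ln)) "END:" then
          (acc.1, acc.2.1, acc.2.2 ++ [pvCanonProp (PySem.Str.strip ln)])
        else (acc.1, acc.2.1 ++ [pvCanonProp (PySem.Str.strip ln)], acc.2.2)) ([], [], []) =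
    ((lines.filter (fun ln =>
        !(PySem.Str.strip ln == "" || v.any (fun pfx => PySem.Str.startswith (PySem.Str.strip ln) pfx)) &&
        PySem.Str.startswith (pvCanonProp (PySem.Str.strip ln)) "BEGIN:")).map
          (fun ln => pvCanonProp (PySem.Str.strip ln)),
     (lines.filter (fun ln =>
        !(PySem.Str.strip ln == "" || v.any (fun pfx => PySem.Str.startswith (PySem.Str.strip ln) pfx)) &&
        (!PySem.Str.startswith (pvCanonProp (PySem.Str.strip ln)) "BEGIN:" &&
         !PySem.Str.startswith (pvCanonProp (PySem.Str.strip ln)) "END:"))).map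
          (fun ln => pvCanonProp (PySem.Str.strip ln)),
     (lines.filter (fun ln =>
        !(PySem.Str.strip ln == "" || v.any (fun pfx => PySem.Str.startswith (PySem.Str.strip ln) pfx)) &&
        (!PySem.Str.startswith (pvCanonProp (PySem.Str.strip ln)) "BEGIN:" &&
         PySem.Str.startswith (pvCanonProp (PySem.Str.strip ln)) "END:"))).map
          (fun ln => pvCanonProp (PySem.Str.strip ln))) := by
  have h : (fun (acc : List String × List String × List String) ln =>
      if PySem.Str.strip ln == "" || v.any (fun pfx => PySem.Str.startswith (PySem.Str.strip ln) pfx) then acc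
      else
        if PySem.Str.startswith (pvCanonProp (PySem.Str.strip ln)) "BEGIN:" then
          (acc.1 ++ [pvCanonProp (PySem.Str.strip ln)], acc.2.1, acc.2.2)
        else if PySem.Str.startswith (pvCanonProp (PySem.Str.strip ln)) "END:" then
          (acc.1, acc.2.1, acc.2.2 ++ [pvCanonProp (PySem.Str.strip ln)])
        else (acc.1, acc.2.1 ++ [pvCanonProp (PySem.Str.strip ln)], acc.2.2)) =
      (fun acc ln =>
        ((fun (a : List String) ln =>
          if (!(PySem.Str.strip ln == "" || v.any (fun pfx => PySem.Str.startswith (PySem.Str.strip ln) pfx)) &&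
              PySem.Str.startswith (pvCanonProp (PySem.Str.strip ln)) "BEGIN:") then
            a ++ [pvCanonProp (PySem.Str.strip ln)] else a) acc.1 ln,
         (fun (a : List String × List String) ln =>
          ((fun (a1 : List String) ln =>
            if (!(PySem.Str.strip ln == "" || v.any (fun pfx => PySem.Str.startswith (PySem.Str.strip ln) pfx)) &&
                (!PySem.Str.startswith (pvCanonProp (PySem.Str.strip ln)) "BEGIN:" &&
                 !PySem.Str.startswith (pvCanonProp (PySem.Str.strip ln)) "END:")) then
              a1 ++ [pvCanonProp (PySem.Str.strip ln)] else a1) a.1 ln,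
           (fun (a2 : List String) ln =>
            if (!(PySem.Str.strip ln == "" || v.any (fun pfx => PySem.Str.startswith (PySem.Str.strip ln) pfx)) &&
                (!PySem.Str.startswith (pvCanonProp (PySem.Str.strip ln)) "BEGIN:" &&
                 PySem.Str.startswith (pvCanonProp (PySem.Str.strip ln)) "END:")) then
              a2 ++ [pvCanonProp (PySem.Str.strip ln)] else a2) a.2 ln)) acc.2 ln)) := by
    funext acc ln
    cases hk : (PySem.Str.strip ln == "" || v.any (fun pfx => PySem.Str.startswith (PySem.Str.strip ln) pfx)) <;>
      cases hb : PySem.Str.startswith (pvCanonProp (PySem.Str.strip ln)) "BEGIN:" <;>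
        cases he : PySem.Str.startswith (pvCanonProp (PySem.Str.strip ln)) "END:" <;>
          simp [hk, hb, he, -List.any_eq_true, -List.any_eq_false, -PySem.Str.startswith_eq]
  rw [h]
  rw [PySem.List.foldl_prod_mk
    (f := fun (a : List String) ln =>
      if (!(PySem.Str.strip ln == "" || v.any (fun pfx => PySem.Str.startswith (PySem.Str.strip ln) pfx)) &&
          PySem.Str.startswith (pvCanonProp (PySem.Str.strip ln)) "BEGIN:") then
        a ++ [pvCanonProp (PySem.Str.strip ln)] else a)
    (g := fun (a : List String × List String) ln =>
      ((fun (a1 : List String) ln =>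
        if (!(PySem.Str.strip ln == "" || v.any (fun pfx => PySem.Str.startswith (PySem.Str.strip ln) pfx)) &&
            (!PySem.Str.startswith (pvCanonProp (PySem.Str.strip ln)) "BEGIN:" &&
             !PySem.Str.startswith (pvCanonProp (PySem.Str.strip ln)) "END:")) then
          a1 ++ [pvCanonProp (PySem.Str.strip ln)] else a1) a.1 ln,
       (fun (a2 : List String) ln =>
        if (!(PySem.Str.strip ln == "" || v.any (fun pfx => PySem.Str.startswith (PySem.Str.strip ln) pfx)) &&
            (!PySem.Str.startswith (pvCanonProp (PySem.Str.strip ln)) "BEGIN:" &&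
             PySem.Str.startswith (pvCanonProp (PySem.Str.strip ln)) "END:")) then
          a2 ++ [pvCanonProp (PySem.Str.strip ln)] else a2) a.2 ln))]
  rw [PySem.List.foldl_prod_mk
    (f := fun (a1 : List String) ln =>
      if (!(PySem.Str.strip ln == "" || v.any (fun pfx => PySem.Str.startswith (PySem.Str.strip ln) pfx)) &&
          (!PySem.Str.startswith (pvCanonProp (PySem.Str.strip ln)) "BEGIN:" &&
           !PySem.Str.startswith (pvCanonProp (PySem.Str.strip ln)) "END:")) then
        a1 ++ [pvCanonProp (PySem.Str.strip ln)] else a1)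
    (g := fun (a2 : List String) ln =>
      if (!(PySem.Str.strip ln == "" || v.any (fun pfx => PySem.Str.startswith (PySem.Str.strip ln) pfx)) &&
          (!PySem.Str.startswith (pvCanonProp (PySem.Str.strip ln)) "BEGIN:" &&
           PySem.Str.startswith (pvCanonProp (PySem.Str.strip ln)) "END:")) then
        a2 ++ [pvCanonProp (PySem.Str.strip ln)] else a2)]
  rw [PySem.List.foldl_append_if, PySem.List.foldl_append_if, PySem.List.foldl_append_if]
  simp


theorem pvKeyVals (c : String) : pvSortKey1 c = 0 ∨ pvSortKey1 c = 1 ∨ pvSortKey1 c = 2 := by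
  unfold pvSortKey1; split_ifs <;> simp

theorem pvK0 (c : String) : (pvSortKey1 c == 0) = PySem.Str.startswith c "BEGIN:" := by
  unfold pvSortKey1; split_ifs with h1 h2 <;> simp [h1, *, -PySem.Str.startswith_eq]

theorem pvK1 (c : String) : (pvSortKey1 c == 1) =
    (!PySem.Str.startswith c "BEGIN:" && !PySem.Str.startswith c "END:") := by
  unfold pvSortKey1; split_ifs with h1 h2 <;> simp [h1, *, -PySem.Str.startswith_eq]

theorem pvK2 (c : String) : (pvSortKey1 c == 2) =
    (!PySem.Str.startswith c "BEGIN:" && PySem.Str.startswith c "END:") := by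
  unfold pvSortKey1; split_ifs with h1 h2 <;> simp [h1, *, -PySem.Str.startswith_eq]

-- ===== VERDICT (by name: the statement is the Claim_ definition above) =====
theorem normalize_common_py_spec : Claim_equal_normalize_common_py := by
  intro text v _
  unfold Spec_normalize_common_py
  simp only [normalize_common_py, normalize_common_py_alt]
  rw [pvFoldStable, pvFoldCanon, pvFoldB]
  rw [pvSorted2Split _ _ pvKeyVals]
  generalize (List.map String.ofList
      (PySem.Chars.splitOn (PySem.Str.replace (pvUnfold text) "\r\n" "\n").toList "\n".toList)) = lines
  simp only [List.filter_map, List.map_map, List.filter_filter, Function.comp_def,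
    pvStrStripRstrip, pvStrStripStrip, pvK0, pvK1, pvK2]
  refine congrArg _ ?_
  refine congrArg₂ (· ++ ·) (congrArg₂ (· ++ ·) ?_ ?_) ?_ <;>
    refine congrArg (fun l => PySem.List.sorted l (fun s => s) false) ?_ <;>
      refine congrArg (List.map _) ?_ <;>
        refine List.filter_congr ?_ <;>
          intro x _ <;>
            cases ha : (PySem.Str.strip x == "") <;>
              cases hb : (v.any fun pfx => PySem.Str.startswith (PySem.Str.strip x) pfx) <;>
                simp [ha, hb, -List.any_eq_true, -List.any_eq_false, -PySem.Str.startswith_eq]
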